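-- pv_equiv track=rewrite | github.com/ddr137/toko_online_sederhana | refactor_dart_files.py | ensure_spacing_import
-- ===== SOURCE A (Python) =====
-- def ensure_spacing_import(content):
--     if 'AppSpacing' in content or 'AppGaps' in content:
--         if "import 'package:toko_online_sederhana/core/utils/spacing.dart';" not in content:
--             lines = content.split('\n')
--             for i, line in enumerate(lines):
--                 if line.strip().startswith('import ') and 'package:' in line:
--                     lines.insert(i + 1, "import 'package:toko_online_sederhana/core/utils/spacing.dart';")
--                     break
--             content = '\n'.join(lines)
--     return content
-- ===== SOURCE B (Python) =====
-- SPACING_IMPORT = "import 'package:toko_online_sederhana/core/utils/spacing.dart';"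
--
--
-- def _with_spacing_after_first_package_import(lines):
--     # structural recursion: rebuild the line list, appending the spacing
--     # import right after the first package-import line encountered
--     if not lines:
--         return []
--     head = lines[0]
--     if head.strip().startswith('import ') and 'package:' in head:
--         return [head, SPACING_IMPORT] + lines[1:]
--     return [head] + _with_spacing_after_first_package_import(lines[1:])
--
--
-- def ensure_spacing_import(content):
--     if (('AppSpacing' in content or 'AppGaps' in content)
--             and SPACING_IMPORT not in content):
--         return '\n'.join(_with_spacing_after_first_package_import(content.split('\n')))
--     return content
-- ===== Notes on version B (the rewrite author's own statement) =====
-- stated objective: alternative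
-- what changed: Replaces the enumerate-index scan with in-place list.insert and re-join by a structural recursion that rebuilds the line list, emitting the spacing import right after the first package-import line; no indices or mutation.
import Mathlib
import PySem

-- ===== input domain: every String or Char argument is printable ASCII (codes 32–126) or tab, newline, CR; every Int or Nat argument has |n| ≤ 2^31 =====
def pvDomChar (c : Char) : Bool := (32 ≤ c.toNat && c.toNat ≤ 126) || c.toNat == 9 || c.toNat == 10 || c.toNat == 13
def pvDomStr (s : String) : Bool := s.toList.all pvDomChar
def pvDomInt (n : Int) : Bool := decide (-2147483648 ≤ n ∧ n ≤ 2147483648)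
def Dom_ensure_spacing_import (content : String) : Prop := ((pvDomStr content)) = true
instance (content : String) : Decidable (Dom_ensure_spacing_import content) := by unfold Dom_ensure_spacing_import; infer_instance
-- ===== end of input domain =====

-- B replaces A's enumerate/insert/break line scan by a structural recursion that rebuilds
-- the line list, emitting the spacing import right after the first package-import line.

-- the literal spacing-import line both Pythons use
def pvSpacing : String := "import 'package:toko_online_sederhana/core/utils/spacing.dart';"

-- line.strip().startswith('import ') and 'package:' in line
def pvIsPkgImport (line : String) : Bool :=
  PySem.Str.startswith (PySem.Str.strip line) "import " && PySem.Str.isIn "package:" line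

-- ===== PORT A =====
-- for i, line in enumerate(lines): if cond: lines.insert(i + 1, SPACING); break
def pvALoop : List String → Nat → List String → List String
  | [], _, full => full
  | line :: rest, i, full =>
      if pvIsPkgImport line then PySem.List.insert full ((i : Int) + 1) pvSpacing
      else pvALoop rest (i + 1) full

def ensure_spacing_import (content : String) : String :=
  if PySem.Str.isIn "AppSpacing" content || PySem.Str.isIn "AppGaps" content then
    if !PySem.Str.isIn pvSpacing content then
      let lines := ((PySem.Str.split? content "\n").getD [])
      PySem.Str.join "\n" (pvALoop lines 0 lines)
    else content
  else content

-- ===== PORT B =====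
def pvBLoop : List String → List String
  | [] => []
  | line :: rest =>
      if pvIsPkgImport line then line :: pvSpacing :: rest
      else line :: pvBLoop rest

def ensure_spacing_import_alt (content : String) : String :=
  if (PySem.Str.isIn "AppSpacing" content || PySem.Str.isIn "AppGaps" content)
      && !PySem.Str.isIn pvSpacing content then
    PySem.Str.join "\n" (pvBLoop (((PySem.Str.split? content "\n").getD [])))
  else content

-- ===== PRECONDITION & SPEC =====
def Spec_ensure_spacing_import (content : String) (out : String) : Prop := out = ensure_spacing_import_alt content
instance (content : String) (out : String) : Decidable (Spec_ensure_spacing_import content out) := by unfold Spec_ensure_spacing_import; infer_instance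

-- ===== CLAIM (what is proved, stated in full; the proofs are below) =====
def Claim_equal_ensure_spacing_import : Prop := ∀ (content : String), Dom_ensure_spacing_import content → Spec_ensure_spacing_import content (ensure_spacing_import content)

-- ===== LEMMAS AND PROOFS =====

theorem pvALoop_eq_pvBLoop (rem pre : List String) :
    pvALoop rem pre.length (pre ++ rem) = pre ++ pvBLoop rem := by
  induction rem generalizing pre with
  | nil => simp [pvALoop, pvBLoop]
  | cons line rest ih =>
      by_cases h : pvIsPkgImport line = true
      · have hle : pre.length + 1 ≤ (pre ++ line :: rest).length := by simp
        have hins := PySem.List.insert_natCast (pre ++ line :: rest) (pre.length + 1) pvSpacing hle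
        simp only [pvALoop, pvBLoop, h, if_pos]
        rw [show ((pre.length : Int) + 1) = ((pre.length + 1 : Nat) : Int) by push_cast; ring, hins,
          show pre ++ line :: rest = (pre ++ [line]) ++ rest by simp,
          show pre.length + 1 = (pre ++ [line]).length by simp,
          List.take_left, List.drop_left]
        simp
      · have := ih (pre ++ [line])
        simpa [pvALoop, pvBLoop, h] using this

-- ===== VERDICT (by name: the statement is the Claim_ definition above) =====
theorem ensure_spacing_import_spec : Claim_equal_ensure_spacing_import := by
  intro content _
  unfold Spec_ensure_spacing_import ensure_spacing_import ensure_spacing_import_alt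
  have hab := pvALoop_eq_pvBLoop ((PySem.Str.split? content "\n").getD []) []
  simp only [List.length_nil, List.nil_append] at hab
  simp only [hab]
  split_ifs <;> simp_all
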